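-- pv_equiv track=rewrite | github.com/NicolasADavid/PythonChallenges | Facebook/matching-pairs.py | matching_pairs
-- ===== SOURCE A (Python) =====
-- def matching_pairs(s, t):
--
--     n = len(s)
--
--     matches = 0
--     best = -3
--
--     for i in range(n):
--
--         if s[i] == t[i]:
--             matches += 1
--
--         for j in range(i+1, n):
--
--             change = 0
--
--             s1 = s[i]
--             t1 = t[i]
--
--             s2 = s[j]
--             t2 = t[j]
--
--             if s1 == t1:
--                 change -= 1
--
--             if s2 == t2:
--                 change -= 1
--
--             if s1 == t2:
--                 change += 1
--
--             if s2 == t1: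
--                 change += 1
--
--             best = max(best, change)
--
--     return matches + best
-- ===== SOURCE B (Python) =====
-- def matching_pairs(s, t):
--     # One-pass O(n): classify each position against set/count summaries of the earlier
--     # positions instead of scanning all later positions; best is the running maximum
--     # swap gain over all pairs (starting from A's -3 "no pair" default).
--     matches = 0        # matched positions seen so far
--     mm = 0             # mismatched positions seen so far
--     mset = set()       # chars at matched positions
--     pset = set()       # (s[i], t[i]) pairs at mismatched positions
--     sset = set()       # s-chars at mismatched positions
--     tset = set()       # t-chars at mismatched positions
--     best = -3          # best swap gain over all pairs seen so far
--     for c, d in zip(s, t):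
--         if c == d:
--             if c in mset or c in sset or c in tset:
--                 cand = 0
--             elif mm > 0:
--                 cand = -1
--             elif matches > 0:
--                 cand = -2
--             else:
--                 cand = None
--         else:
--             if (d, c) in pset:
--                 cand = 2
--             elif d in sset or c in tset:
--                 cand = 1
--             elif mm > 0:
--                 cand = 0
--             elif c in mset or d in mset:
--                 cand = 0
--             elif matches > 0:
--                 cand = -1
--             else:
--                 cand = None
--         if cand is not None:
--             best = max(best, cand)
--         if c == d:
--             matches += 1
--             mset.add(c)
--         else:
--             mm += 1
--             pset.add((c, d))
--             sset.add(c)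
--             tset.add(d)
--     return matches + best
-- ===== Notes on version B (the rewrite author's own statement) =====
-- stated objective: faster
-- what changed: Replaces A's O(n^2) scan over all index pairs by a single left-to-right pass that keeps hash-set/count summaries of the positions seen so far (matched chars, mismatched (s,t) pairs and their two char projections) and reads the best achievable swap gain for each new position from set membership in O(1).
import Mathlib
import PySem

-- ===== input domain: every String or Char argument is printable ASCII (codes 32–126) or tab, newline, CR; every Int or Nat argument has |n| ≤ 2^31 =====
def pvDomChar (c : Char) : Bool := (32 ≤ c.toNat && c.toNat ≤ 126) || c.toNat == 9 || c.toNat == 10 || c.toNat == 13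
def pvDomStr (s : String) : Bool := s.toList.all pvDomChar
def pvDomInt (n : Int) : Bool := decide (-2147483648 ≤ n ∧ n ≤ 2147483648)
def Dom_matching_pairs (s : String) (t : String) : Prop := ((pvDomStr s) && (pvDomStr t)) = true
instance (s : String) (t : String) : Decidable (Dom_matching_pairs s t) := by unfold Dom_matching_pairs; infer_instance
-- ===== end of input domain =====

-- B replaces A's O(n^2) all-pairs scan by a single O(n) pass that classifies each
-- position against set summaries of the earlier positions (objective: faster).

-- ===== PORT A =====
-- the body of A's outer loop (named so the proofs can speak about it; code is verbatim A's)
def aBody (sl tl : List Char) (n : Int) (st : Int × Int) (i : Int) : Int × Int :=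
  let matchesv := if PySem.List.pyGetD sl i ' ' = PySem.List.pyGetD tl i ' ' then st.1 + 1 else st.1
  let best :=
    (PySem.List.pyRange (i + 1) n 1).foldl (fun b j =>
      let s1 := PySem.List.pyGetD sl i ' '
      let t1 := PySem.List.pyGetD tl i ' '
      let s2 := PySem.List.pyGetD sl j ' '
      let t2 := PySem.List.pyGetD tl j ' '
      let change : Int := 0
      let change := if s1 = t1 then change - 1 else change
      let change := if s2 = t2 then change - 1 else change
      let change := if s1 = t2 then change + 1 else change
      let change := if s2 = t1 then change + 1 else change
      max b change) st.2
  (matchesv, best)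

def matching_pairs (s : String) (t : String) : Int :=
  let sl := s.toList
  let tl := t.toList
  let n : Int := PySem.List.len sl
  let r := (PySem.List.pyRange 0 n 1).foldl (aBody sl tl n) ((0 : Int), (-3 : Int))
  r.1 + r.2

-- ===== PORT B =====
structure BSt where
  m : Int
  mm : Int
  mset : PySem.Set Char
  pset : PySem.Set (Char × Char)
  sset : PySem.Set Char
  tset : PySem.Set Char
  best : Int

def bcand (st : BSt) (c : Char) (d : Char) : Option Int :=
  if c = d then
    if c ∈ st.mset ∨ c ∈ st.sset ∨ c ∈ st.tset then some 0
    else if st.mm > 0 then some (-1)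
    else if st.m > 0 then some (-2)
    else none
  else
    if (d, c) ∈ st.pset then some 2
    else if d ∈ st.sset ∨ c ∈ st.tset then some 1
    else if st.mm > 0 then some 0
    else if c ∈ st.mset ∨ d ∈ st.mset then some 0
    else if st.m > 0 then some (-1)
    else none

def bmerge (b : Int) (cand : Option Int) : Int :=
  match cand with
  | none => b
  | some v => max b v

def bstep (st : BSt) (p : Char × Char) : BSt :=
  let best := bmerge st.best (bcand st p.1 p.2)
  if p.1 = p.2 then
    ⟨st.m + 1, st.mm, PySem.Set.add st.mset p.1, st.pset, st.sset, st.tset, best⟩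
  else
    ⟨st.m, st.mm + 1, st.mset, PySem.Set.add st.pset (p.1, p.2),
     PySem.Set.add st.sset p.1, PySem.Set.add st.tset p.2, best⟩

def bfinish (st : BSt) : Int := st.m + st.best

def matching_pairs_alt (s : String) (t : String) : Int :=
  bfinish ((s.toList.zip t.toList).foldl bstep
    ⟨0, 0, PySem.Set.empty, PySem.Set.empty, PySem.Set.empty, PySem.Set.empty, -3⟩)

-- ===== PRECONDITION & SPEC =====
-- Pre_ excludes exactly the inputs where A raises IndexError (t shorter than s).
def Pre_matching_pairs (s : String) (t : String) : Prop := s.toList.length ≤ t.toList.length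
instance (s : String) (t : String) : Decidable (Pre_matching_pairs s t) := by
  unfold Pre_matching_pairs; infer_instance
def pvWitness_matching_pairs : String × String := ("ab", "ba")

def Spec_matching_pairs (s : String) (t : String) (out : Int) : Prop :=
  out = matching_pairs_alt s t
instance (s : String) (t : String) (out : Int) : Decidable (Spec_matching_pairs s t out) := by
  unfold Spec_matching_pairs; infer_instance

-- ===== CLAIM (what is proved, stated in full; the proofs are below) =====
def Claim_equal_matching_pairs : Prop := ∀ (s : String) (t : String), Dom_matching_pairs s t → Pre_matching_pairs s t → Spec_matching_pairs s t (matching_pairs s t)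

-- ===== LEMMAS AND PROOFS =====

-- the swap gain of exchanging the two positions holding pairs p and q
def mchg (p q : Char × Char) : Int :=
  (if p.1 = p.2 then (-1 : Int) else 0) + (if q.1 = q.2 then (-1 : Int) else 0)
  + (if p.1 = q.2 then (1 : Int) else 0) + (if q.1 = p.2 then (1 : Int) else 0)

def mpMatched (p : Char × Char) : Bool := p.1 == p.2

-- A's inner-loop change chain, as a function
def chgExpr (s1 t1 s2 t2 : Char) : Int :=
  let change : Int := 0
  let change := if s1 = t1 then change - 1 else change
  let change := if s2 = t2 then change - 1 else change
  let change := if s1 = t2 then change + 1 else change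
  let change := if s2 = t1 then change + 1 else change
  change

lemma chgExpr_eq (a b c d : Char) : chgExpr a b c d = mchg (a, b) (c, d) := by
  simp only [chgExpr, mchg]; split_ifs <;> omega

lemma aBody_apply (sl tl : List Char) (n : Int) (st : Int × Int) (i : Int) :
    aBody sl tl n st i =
      (if PySem.List.pyGetD sl i ' ' = PySem.List.pyGetD tl i ' ' then st.1 + 1 else st.1,
       (PySem.List.pyRange (i + 1) n 1).foldl (fun b j =>
         max b (chgExpr (PySem.List.pyGetD sl i ' ') (PySem.List.pyGetD tl i ' ')
                        (PySem.List.pyGetD sl j ' ') (PySem.List.pyGetD tl j ' '))) st.2) := rfl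

-- all ordered pairs (earlier element, later element) of a list
def mpairs : List (Char × Char) → List ((Char × Char) × (Char × Char))
  | [] => []
  | p :: r => (r.map (fun q => (p, q))) ++ mpairs r

def mchanges (L : List (Char × Char)) : List Int := (mpairs L).map (fun pq => mchg pq.1 pq.2)

def omax1 (o : Option Int) (x : Int) : Option Int :=
  some (match o with | none => x | some v => max v x)
def omax (l : List Int) : Option Int := l.foldl omax1 none

-- A's nested loop, expressed structurally on the zipped list
def pairFold : List (Char × Char) → Int → Int
  | [], b => b
  | p :: r, b => pairFold r (r.foldl (fun acc q => max acc (mchg p q)) b)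

lemma foldl_omax1_some (l : List Int) (b : Int) :
    l.foldl omax1 (some b) = some (l.foldl max b) := by
  induction l generalizing b with
  | nil => rfl
  | cons x t ih => simp [omax1, List.foldl_cons, ih]

lemma omax_cons (x : Int) (l : List Int) : omax (x :: l) = some (l.foldl max x) := by
  simp [omax, omax1, List.foldl_cons, foldl_omax1_some]

lemma foldl_max_le {v : Int} (l : List Int) (b : Int) (hb : b ≤ v) (h : ∀ x ∈ l, x ≤ v) :
    l.foldl max b ≤ v := by
  rcases PySem.List.foldl_max_mem l b with h1 | h1
  · omega
  · exact h _ h1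

lemma omax_eq_some_of {l : List Int} {v : Int} (hmem : v ∈ l) (hub : ∀ x ∈ l, x ≤ v) :
    omax l = some v := by
  cases l with
  | nil => simp at hmem
  | cons x t =>
    rw [omax_cons]
    have h1 := PySem.List.le_foldl_max t x
    have h2 : t.foldl max x ≤ v := by
      apply foldl_max_le
      · exact hub x (by simp)
      · intro y hy; exact hub y (by simp [hy])
    have h3 : v ≤ t.foldl max x := by
      rcases List.mem_cons.mp hmem with rfl | hv
      · exact h1.1
      · exact h1.2 _ hv
    simp [le_antisymm h2 h3]

lemma foldl_max_assoc (t : List Int) (a b : Int) :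
    t.foldl max (max a b) = max a (t.foldl max b) := by
  induction t generalizing b with
  | nil => rfl
  | cons y r ih => simp only [List.foldl_cons, max_assoc, ih]

lemma foldl_max_omax (l : List Int) (b : Int) :
    l.foldl max b = match omax l with | none => b | some v => max b v := by
  cases l with
  | nil => rfl
  | cons y t =>
    rw [omax_cons]
    simp only [List.foldl_cons]
    exact foldl_max_assoc t b y

lemma bmerge_foldl (m : List Int) (b : Int) : m.foldl max b = bmerge b (omax m) := by
  rw [foldl_max_omax]
  cases omax m <;> rfl

lemma foldl_max_perm {l l' : List Int} (h : l.Perm l') (b : Int) :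
    l.foldl max b = l'.foldl max b :=
  @List.Perm.foldl_eq _ _ max l l' ⟨fun a b c => max_right_comm a b c⟩ h b

lemma mchg_le_two (p q : Char × Char) : mchg p q ≤ 2 := by
  unfold mchg; split_ifs <;> omega

lemma mchg_apply (a b c d : Char) :
    mchg (a, b) (c, d) = (if a = b then (-1 : Int) else 0) + (if c = d then (-1 : Int) else 0)
      + (if a = d then (1 : Int) else 0) + (if c = b then (1 : Int) else 0) := rfl

lemma mchg_apply' (p : Char × Char) (c d : Char) :
    mchg p (c, d) = (if p.1 = p.2 then (-1 : Int) else 0) + (if c = d then (-1 : Int) else 0)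
      + (if p.1 = d then (1 : Int) else 0) + (if c = p.2 then (1 : Int) else 0) := rfl

lemma mchg_eval4 (a b c d : Char) (v1 v2 v3 v4 : Int)
    (h1 : (if a = b then (-1 : Int) else 0) = v1) (h2 : (if c = d then (-1 : Int) else 0) = v2)
    (h3 : (if a = d then (1 : Int) else 0) = v3) (h4 : (if c = b then (1 : Int) else 0) = v4) :
    mchg (a, b) (c, d) = v1 + v2 + v3 + v4 := by
  rw [mchg_apply, h1, h2, h3, h4]

lemma mchg_eval4' (p : Char × Char) (c d : Char) (v1 v2 v3 v4 : Int)
    (h1 : (if p.1 = p.2 then (-1 : Int) else 0) = v1) (h2 : (if c = d then (-1 : Int) else 0) = v2)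
    (h3 : (if p.1 = d then (1 : Int) else 0) = v3) (h4 : (if c = p.2 then (1 : Int) else 0) = v4) :
    mchg p (c, d) = v1 + v2 + v3 + v4 := by
  rw [mchg_apply', h1, h2, h3, h4]

lemma pair_eta (q : Char × Char) (a b : Char) (h1 : a = q.1) (h2 : b = q.2) : (a, b) = q := by
  rw [h1, h2]

lemma mchg_matched_le (p : Char × Char) (c d : Char) (hpm : p.1 = p.2) : mchg p (c, d) ≤ 0 := by
  rw [mchg_apply']
  by_cases h3 : p.1 = d <;> by_cases h4 : c = p.2
  · have h2 : c = d := by rw [h4, ← hpm, h3]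
    rw [if_pos hpm, if_pos h2, if_pos h3, if_pos h4]; omega
  · rw [if_pos hpm, if_pos h3, if_neg h4]; split_ifs <;> omega
  · rw [if_pos hpm, if_neg h3, if_pos h4]; split_ifs <;> omega
  · rw [if_pos hpm, if_neg h3, if_neg h4]; split_ifs <;> omega

lemma mchg_cc_le (p : Char × Char) (c : Char) : mchg p (c, c) ≤ 0 := by
  by_cases hpm : p.1 = p.2
  · exact mchg_matched_le p c c hpm
  · by_cases u3 : p.1 = c
    · rw [mchg_eval4' p c c 0 (-1) 1 0 (if_neg hpm) (if_pos rfl) (if_pos u3)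
        (if_neg (fun hh => hpm (u3.trans hh)))]
      omega
    · by_cases u4 : c = p.2
      · rw [mchg_eval4' p c c 0 (-1) 0 1 (if_neg hpm) (if_pos rfl) (if_neg u3) (if_pos u4)]
        omega
      · rw [mchg_eval4' p c c 0 (-1) 0 0 (if_neg hpm) (if_pos rfl) (if_neg u3) (if_neg u4)]
        omega

lemma mchg_cc_notc (p : Char × Char) (c : Char) (hA : p.1 ≠ c) (hB : p.2 ≠ c) :
    mchg p (c, c) = (if p.1 = p.2 then (-1 : Int) else 0) + -1 := by
  rw [mchg_eval4' p c c _ (-1) 0 0 rfl (if_pos rfl) (if_neg hA)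
    (if_neg (fun hh => hB hh.symm))]
  ring

lemma mpairs_append_perm (P : List (Char × Char)) (q : Char × Char) :
    (mpairs (P ++ [q])).Perm (mpairs P ++ P.map (fun p => (p, q))) := by
  induction P with
  | nil => simp [mpairs]
  | cons p P ih =>
    simp only [List.cons_append, mpairs, List.map_append, List.map_cons, List.map_nil,
      List.append_assoc]
    refine List.Perm.append_left _ ?_
    exact (List.Perm.cons _ ih).trans List.perm_middle.symm

lemma mchanges_append (P : List (Char × Char)) (q : Char × Char) :
    (mchanges (P ++ [q])).Perm (mchanges P ++ P.map (fun p => mchg p q)) := by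
  have h := (mpairs_append_perm P q).map (fun pq => mchg pq.1 pq.2)
  simpa [mchanges, List.map_append, List.map_map, Function.comp] using h

lemma pairFold_eq (L : List (Char × Char)) (b : Int) :
    pairFold L b = (mchanges L).foldl max b := by
  induction L generalizing b with
  | nil => rfl
  | cons p r ih =>
    have h1 : mchanges (p :: r) = r.map (fun q => mchg p q) ++ mchanges r := by
      simp [mchanges, mpairs, List.map_append, List.map_map, Function.comp]
    rw [pairFold, ih, h1, List.foldl_append, List.foldl_map]

-- ===== A characterization =====

lemma inner_fold_eq (sl tl : List Char) (h : sl.length ≤ tl.length) (i : Int) (fuel : Nat) :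
    ∀ (j0 : Nat) (acc : Int), sl.length - j0 ≤ fuel →
      (PySem.List.pyRange (j0 : Int) (sl.length : Int) 1).foldl (fun b j =>
          max b (chgExpr (PySem.List.pyGetD sl i ' ') (PySem.List.pyGetD tl i ' ')
                         (PySem.List.pyGetD sl j ' ') (PySem.List.pyGetD tl j ' '))) acc
        = ((sl.zip tl).drop j0).foldl (fun acc2 q =>
            max acc2 (mchg (PySem.List.pyGetD sl i ' ', PySem.List.pyGetD tl i ' ') q)) acc := by
  induction fuel with
  | zero =>
    intro j0 acc hf
    have h1 : (sl.length : Int) ≤ (j0 : Int) := by exact_mod_cast Nat.le_of_sub_eq_zero (Nat.le_zero.mp hf)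
    rw [PySem.List.pyRange_one_eq_nil h1]
    rw [List.drop_eq_nil_of_le (by rw [List.length_zip]; omega)]
    rfl
  | succ fuel ih =>
    intro j0 acc hf
    by_cases hj : j0 < sl.length
    · have hjz : j0 < (sl.zip tl).length := by rw [List.length_zip]; omega
      have hj2 : j0 < tl.length := by omega
      rw [PySem.List.pyRange_one_cons (by exact_mod_cast hj)]
      rw [List.drop_eq_getElem_cons hjz]
      simp only [List.foldl_cons]
      have hsj : PySem.List.pyGetD sl ((j0 : Nat) : Int) ' ' = ((sl.zip tl)[j0]'hjz).1 := by
        rw [PySem.List.pyGetD_natCast, List.getD_eq_getElem _ _ hj]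
        simp [List.getElem_zip]
      have htj : PySem.List.pyGetD tl ((j0 : Nat) : Int) ' ' = ((sl.zip tl)[j0]'hjz).2 := by
        rw [PySem.List.pyGetD_natCast, List.getD_eq_getElem _ _ hj2]
        simp [List.getElem_zip]
      rw [hsj, htj, chgExpr_eq]
      have hcast : ((j0 : Nat) : Int) + 1 = (((j0 + 1 : Nat)) : Int) := by push_cast; ring
      rw [hcast]
      rw [ih (j0 + 1) _ (by omega)]
    · have h1 : (sl.length : Int) ≤ (j0 : Int) := by exact_mod_cast Nat.le_of_not_lt hj
      rw [PySem.List.pyRange_one_eq_nil h1]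
      rw [List.drop_eq_nil_of_le (by rw [List.length_zip]; omega)]
      rfl

lemma outer_fold_eq (sl tl : List Char) (h : sl.length ≤ tl.length) (fuel : Nat) :
    ∀ (k : Nat) (m bacc : Int), sl.length - k ≤ fuel →
      (PySem.List.pyRange (k : Int) (sl.length : Int) 1).foldl (aBody sl tl (sl.length : Int)) (m, bacc)
        = (m + (((sl.zip tl).drop k).countP mpMatched : Int), pairFold ((sl.zip tl).drop k) bacc) := by
  induction fuel with
  | zero =>
    intro k m bacc hf
    have h1 : (sl.length : Int) ≤ (k : Int) := by exact_mod_cast Nat.le_of_sub_eq_zero (Nat.le_zero.mp hf)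
    rw [PySem.List.pyRange_one_eq_nil h1]
    rw [List.drop_eq_nil_of_le (by rw [List.length_zip]; omega)]
    simp [pairFold]
  | succ fuel ih =>
    intro k m bacc hf
    by_cases hk : k < sl.length
    · have hkz : k < (sl.zip tl).length := by rw [List.length_zip]; omega
      have hk2 : k < tl.length := by omega
      have hsk : PySem.List.pyGetD sl ((k : Nat) : Int) ' ' = ((sl.zip tl)[k]'hkz).1 := by
        rw [PySem.List.pyGetD_natCast, List.getD_eq_getElem _ _ hk]
        simp [List.getElem_zip]
      have htk : PySem.List.pyGetD tl ((k : Nat) : Int) ' ' = ((sl.zip tl)[k]'hkz).2 := by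
        rw [PySem.List.pyGetD_natCast, List.getD_eq_getElem _ _ hk2]
        simp [List.getElem_zip]
      rw [PySem.List.pyRange_one_cons (by exact_mod_cast hk)]
      simp only [List.foldl_cons]
      rw [aBody_apply]
      have hcast : ((k : Nat) : Int) + 1 = (((k + 1 : Nat)) : Int) := by push_cast; ring
      rw [hcast]
      rw [inner_fold_eq sl tl h ((k : Nat) : Int) sl.length (k + 1) (m, bacc).2 (by omega)]
      rw [hsk, htk]
      rw [ih (k + 1) _ _ (by omega)]
      rw [List.drop_eq_getElem_cons hkz]
      refine Prod.ext ?_ ?_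
      · dsimp only
        simp only [List.countP_cons]
        by_cases hmq : ((sl.zip tl)[k]'hkz).1 = ((sl.zip tl)[k]'hkz).2
        · rw [if_pos hmq, if_pos (show mpMatched ((sl.zip tl)[k]'hkz) = true by simp only [mpMatched, beq_iff_eq]; exact hmq)]
          push_cast; ring
        · rw [if_neg hmq, if_neg (show ¬ mpMatched ((sl.zip tl)[k]'hkz) = true by simp only [mpMatched, beq_iff_eq]; exact hmq)]
          simp
      · rfl
    · have h1 : (sl.length : Int) ≤ (k : Int) := by exact_mod_cast Nat.le_of_not_lt hk
      rw [PySem.List.pyRange_one_eq_nil h1]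
      rw [List.drop_eq_nil_of_le (by rw [List.length_zip]; omega)]
      simp [pairFold]

lemma A_char (s t : String) (h : s.toList.length ≤ t.toList.length) :
    matching_pairs s t
      = ((s.toList.zip t.toList).countP mpMatched : Int) + pairFold (s.toList.zip t.toList) (-3) := by
  unfold matching_pairs
  simp only [PySem.List.len_eq]
  have h0 := outer_fold_eq s.toList t.toList h s.toList.length 0 0 (-3) (by omega)
  simp only [Nat.cast_zero, List.drop_zero] at h0
  rw [h0]
  simp

-- ===== B characterization =====

def BInv (P : List (Char × Char)) (st : BSt) : Prop :=
  st.m = (P.countP mpMatched : Int) ∧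
  st.mm = (P.countP (fun p => !mpMatched p) : Int) ∧
  (∀ c : Char, c ∈ st.mset ↔ (c, c) ∈ P) ∧
  (∀ x y : Char, (x, y) ∈ st.pset ↔ ((x, y) ∈ P ∧ x ≠ y)) ∧
  (∀ c : Char, c ∈ st.sset ↔ ∃ e, (c, e) ∈ P ∧ c ≠ e) ∧
  (∀ c : Char, c ∈ st.tset ↔ ∃ a, (a, c) ∈ P ∧ a ≠ c) ∧
  st.best = (mchanges P).foldl max (-3)

lemma bcand_spec (P : List (Char × Char)) (st : BSt) (c d : Char) (hinv : BInv P st) :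
    bcand st c d = omax (P.map (fun p => mchg p (c, d))) := by
  obtain ⟨hm, hmm, hmset, hpset, hsset, htset, -⟩ := hinv
  have hmm' : 0 < st.mm ↔ ∃ p ∈ P, p.1 ≠ p.2 := by
    rw [hmm]
    constructor
    · intro hpos
      have h0 : 0 < P.countP (fun p => !mpMatched p) := by exact_mod_cast hpos
      obtain ⟨p, hp, hb⟩ := List.countP_pos_iff.mp h0
      exact ⟨p, hp, by simpa [mpMatched] using hb⟩
    · rintro ⟨p, hp, hne⟩
      have h0 : 0 < P.countP (fun p => !mpMatched p) :=
        List.countP_pos_iff.mpr ⟨p, hp, by simpa [mpMatched] using hne⟩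
      exact_mod_cast h0
  have hm' : 0 < st.m ↔ ∃ p ∈ P, p.1 = p.2 := by
    rw [hm]
    constructor
    · intro hpos
      have h0 : 0 < P.countP mpMatched := by exact_mod_cast hpos
      obtain ⟨p, hp, hb⟩ := List.countP_pos_iff.mp h0
      exact ⟨p, hp, by simpa [mpMatched] using hb⟩
    · rintro ⟨p, hp, heq⟩
      have h0 : 0 < P.countP mpMatched :=
        List.countP_pos_iff.mpr ⟨p, hp, by simpa [mpMatched] using heq⟩
      exact_mod_cast h0
  have hPnil : ¬ st.m > 0 → ¬ st.mm > 0 → P = [] := by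
    intro h1 h2
    cases P with
    | nil => rfl
    | cons p r =>
      exfalso
      by_cases hp : p.1 = p.2
      · exact h1 (hm'.mpr ⟨p, by simp, hp⟩)
      · exact h2 (hmm'.mpr ⟨p, by simp, hp⟩)
  unfold bcand
  by_cases hcd : c = d
  · subst hcd
    rw [if_pos rfl]
    by_cases h1 : c ∈ st.mset ∨ c ∈ st.sset ∨ c ∈ st.tset
    · rw [if_pos h1]
      symm
      apply omax_eq_some_of
      · rcases h1 with hh | hh | hh
        · refine List.mem_map.mpr ⟨(c, c), (hmset c).mp hh, ?_⟩
          rw [mchg_eval4 c c c c (-1) (-1) 1 1 (if_pos rfl) (if_pos rfl) (if_pos rfl) (if_pos rfl)]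
          omega
        · obtain ⟨e, hpe, hne⟩ := (hsset c).mp hh
          refine List.mem_map.mpr ⟨(c, e), hpe, ?_⟩
          rw [mchg_eval4 c e c c 0 (-1) 1 0 (if_neg hne) (if_pos rfl) (if_pos rfl) (if_neg hne)]
          omega
        · obtain ⟨a, hpa, hne⟩ := (htset c).mp hh
          refine List.mem_map.mpr ⟨(a, c), hpa, ?_⟩
          rw [mchg_eval4 a c c c 0 (-1) 0 1 (if_neg hne) (if_pos rfl) (if_neg hne) (if_pos rfl)]
          omega
      · intro x hx
        obtain ⟨p, hp, rfl⟩ := List.mem_map.mp hx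
        exact mchg_cc_le p c
    · rw [if_neg h1]
      simp only [not_or] at h1
      obtain ⟨hn1, hn2, hn3⟩ := h1
      have kA : ∀ p ∈ P, p.1 ≠ c := by
        intro p hp hh
        by_cases hpm : p.1 = p.2
        · exact hn1 ((hmset c).mpr (by
            rw [pair_eta p c c hh.symm (hh.symm.trans hpm)]; exact hp))
        · exact hn2 ((hsset c).mpr ⟨p.2,
            by rw [pair_eta p c p.2 hh.symm rfl]; exact hp,
            by rw [← hh]; exact hpm⟩)
      have kB : ∀ p ∈ P, p.2 ≠ c := by
        intro p hp hh
        by_cases hpm : p.1 = p.2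
        · exact kA p hp (hpm.trans hh)
        · exact hn3 ((htset c).mpr ⟨p.1,
            by rw [pair_eta p p.1 c rfl hh.symm]; exact hp,
            fun hcc => hpm (hcc.trans hh.symm)⟩)
      by_cases h2 : st.mm > 0
      · rw [if_pos h2]
        symm
        apply omax_eq_some_of
        · obtain ⟨p, hp, hne⟩ := hmm'.mp h2
          refine List.mem_map.mpr ⟨p, hp, ?_⟩
          rw [mchg_cc_notc p c (kA p hp) (kB p hp), if_neg hne]
          omega
        · intro x hx
          obtain ⟨p, hp, rfl⟩ := List.mem_map.mp hx
          rw [mchg_cc_notc p c (kA p hp) (kB p hp)]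
          split_ifs <;> omega
      · rw [if_neg h2]
        have hallm : ∀ p ∈ P, p.1 = p.2 := by
          intro p hp
          by_contra hne
          exact h2 (hmm'.mpr ⟨p, hp, hne⟩)
        by_cases h3 : st.m > 0
        · rw [if_pos h3]
          symm
          apply omax_eq_some_of
          · obtain ⟨p, hp, heq⟩ := hm'.mp h3
            refine List.mem_map.mpr ⟨p, hp, ?_⟩
            rw [mchg_cc_notc p c (kA p hp) (kB p hp), if_pos heq]
            omega
          · intro x hx
            obtain ⟨p, hp, rfl⟩ := List.mem_map.mp hx
            rw [mchg_cc_notc p c (kA p hp) (kB p hp), if_pos (hallm p hp)]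
            omega
        · rw [if_neg h3, hPnil h3 h2]
          rfl
  · rw [if_neg hcd]
    by_cases b1 : (d, c) ∈ st.pset
    · rw [if_pos b1]
      symm
      apply omax_eq_some_of
      · obtain ⟨hpdc, hnedc⟩ := (hpset d c).mp b1
        refine List.mem_map.mpr ⟨(d, c), hpdc, ?_⟩
        rw [mchg_eval4 d c c d 0 0 1 1 (if_neg hnedc) (if_neg hcd) (if_pos rfl) (if_pos rfl)]
        omega
      · intro x hx
        obtain ⟨p, hp, rfl⟩ := List.mem_map.mp hx
        exact mchg_le_two p (c, d)
    · rw [if_neg b1]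
      have hknot : ∀ p ∈ P, ¬ p.1 = p.2 → ¬ (p.1 = d ∧ c = p.2) := by
        rintro p hp hpm ⟨u3, u4⟩
        exact b1 ((hpset d c).mpr ⟨by rw [pair_eta p d c u3.symm u4]; exact hp,
          fun e => hcd e.symm⟩)
      by_cases b2 : d ∈ st.sset ∨ c ∈ st.tset
      · rw [if_pos b2]
        symm
        apply omax_eq_some_of
        · rcases b2 with hh | hh
          · obtain ⟨e, hpe, hne⟩ := (hsset d).mp hh
            have hce : ¬ c = e := fun u4 => hknot (d, e) hpe hne ⟨rfl, u4⟩
            refine List.mem_map.mpr ⟨(d, e), hpe, ?_⟩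
            rw [mchg_eval4 d e c d 0 0 1 0 (if_neg hne) (if_neg hcd) (if_pos rfl) (if_neg hce)]
            omega
          · obtain ⟨a, hpa, hne⟩ := (htset c).mp hh
            have had : ¬ a = d := fun u3 => hknot (a, c) hpa hne ⟨u3, rfl⟩
            refine List.mem_map.mpr ⟨(a, c), hpa, ?_⟩
            rw [mchg_eval4 a c c d 0 0 0 1 (if_neg hne) (if_neg hcd) (if_neg had) (if_pos rfl)]
            omega
        · intro x hx
          obtain ⟨p, hp, rfl⟩ := List.mem_map.mp hx
          by_cases hpm : p.1 = p.2
          · exact (mchg_matched_le p c d hpm).trans (by omega)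
          · have hk2 : ¬ (p.1 = d ∧ c = p.2) := hknot p hp hpm
            by_cases u3 : p.1 = d
            · rw [mchg_eval4' p c d 0 0 1 0 (if_neg hpm) (if_neg hcd) (if_pos u3)
                (if_neg (fun u4 => hk2 ⟨u3, u4⟩))]
              omega
            · by_cases u4 : c = p.2
              · rw [mchg_eval4' p c d 0 0 0 1 (if_neg hpm) (if_neg hcd) (if_neg u3) (if_pos u4)]
                omega
              · rw [mchg_eval4' p c d 0 0 0 0 (if_neg hpm) (if_neg hcd) (if_neg u3) (if_neg u4)]
                omega
      · rw [if_neg b2]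
        simp only [not_or] at b2
        obtain ⟨bn1, bn2⟩ := b2
        have kC : ∀ p ∈ P, ¬ p.1 = p.2 → p.1 ≠ d := by
          intro p hp hpm hh
          exact bn1 ((hsset d).mpr ⟨p.2, by rw [pair_eta p d p.2 hh.symm rfl]; exact hp,
            by rw [← hh]; exact hpm⟩)
        have kD : ∀ p ∈ P, ¬ p.1 = p.2 → p.2 ≠ c := by
          intro p hp hpm hh
          exact bn2 ((htset c).mpr ⟨p.1, by rw [pair_eta p p.1 c rfl hh.symm]; exact hp,
            fun e => hpm (e.trans hh.symm)⟩)
        by_cases b3 : st.mm > 0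
        · rw [if_pos b3]
          symm
          apply omax_eq_some_of
          · obtain ⟨p, hp, hne⟩ := hmm'.mp b3
            refine List.mem_map.mpr ⟨p, hp, ?_⟩
            rw [mchg_eval4' p c d 0 0 0 0 (if_neg hne) (if_neg hcd) (if_neg (kC p hp hne))
              (if_neg (fun u4 => kD p hp hne u4.symm))]
            omega
          · intro x hx
            obtain ⟨p, hp, rfl⟩ := List.mem_map.mp hx
            by_cases hpm : p.1 = p.2
            · exact mchg_matched_le p c d hpm
            · rw [mchg_eval4' p c d 0 0 0 0 (if_neg hpm) (if_neg hcd) (if_neg (kC p hp hpm))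
                (if_neg (fun u4 => kD p hp hpm u4.symm))]
              omega
        · rw [if_neg b3]
          have hallm : ∀ p ∈ P, p.1 = p.2 := by
            intro p hp
            by_contra hne
            exact b3 (hmm'.mpr ⟨p, hp, hne⟩)
          by_cases b4 : c ∈ st.mset ∨ d ∈ st.mset
          · rw [if_pos b4]
            symm
            apply omax_eq_some_of
            · rcases b4 with hh | hh
              · refine List.mem_map.mpr ⟨(c, c), (hmset c).mp hh, ?_⟩
                rw [mchg_eval4 c c c d (-1) 0 0 1 (if_pos rfl) (if_neg hcd) (if_neg hcd) (if_pos rfl)]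
                omega
              · refine List.mem_map.mpr ⟨(d, d), (hmset d).mp hh, ?_⟩
                rw [mchg_eval4 d d c d (-1) 0 1 0 (if_pos rfl) (if_neg hcd) (if_pos rfl) (if_neg hcd)]
                omega
            · intro x hx
              obtain ⟨p, hp, rfl⟩ := List.mem_map.mp hx
              exact mchg_matched_le p c d (hallm p hp)
          · rw [if_neg b4]
            simp only [not_or] at b4
            obtain ⟨bn3, bn4⟩ := b4
            have kE : ∀ p ∈ P, p.1 = p.2 → p.1 ≠ c ∧ p.1 ≠ d := by
              intro p hp hpm
              constructor
              · intro hh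
                exact bn3 ((hmset c).mpr (by
                  rw [pair_eta p c c hh.symm (hh.symm.trans hpm)]; exact hp))
              · intro hh
                exact bn4 ((hmset d).mpr (by
                  rw [pair_eta p d d hh.symm (hh.symm.trans hpm)]; exact hp))
            by_cases b5 : st.m > 0
            · rw [if_pos b5]
              symm
              apply omax_eq_some_of
              · obtain ⟨p, hp, heq⟩ := hm'.mp b5
                obtain ⟨hpc, hpd⟩ := kE p hp heq
                refine List.mem_map.mpr ⟨p, hp, ?_⟩
                rw [mchg_eval4' p c d (-1) 0 0 0 (if_pos heq) (if_neg hcd) (if_neg hpd)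
                  (if_neg (fun u4 => hpc (heq.trans u4.symm)))]
                omega
              · intro x hx
                obtain ⟨p, hp, rfl⟩ := List.mem_map.mp hx
                obtain ⟨hpc, hpd⟩ := kE p hp (hallm p hp)
                rw [mchg_eval4' p c d (-1) 0 0 0 (if_pos (hallm p hp)) (if_neg hcd) (if_neg hpd)
                  (if_neg (fun u4 => hpc ((hallm p hp).trans u4.symm)))]
                omega
            · rw [if_neg b5, hPnil b5 b3]
              rfl

lemma bstep_inv (P : List (Char × Char)) (st : BSt) (q : Char × Char) (hinv : BInv P st) :
    BInv (P ++ [q]) (bstep st q) := by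
  have hcand := bcand_spec P st q.1 q.2 hinv
  obtain ⟨hm, hmm, hmset, hpset, hsset, htset, hbest⟩ := hinv
  have hbest' : bmerge st.best (bcand st q.1 q.2) = (mchanges (P ++ [q])).foldl max (-3) := by
    rw [hbest, hcand, foldl_max_perm (mchanges_append P q) (-3), List.foldl_append]
    exact (bmerge_foldl _ _).symm
  unfold bstep
  by_cases hq : q.1 = q.2
  · rw [if_pos hq]
    refine ⟨?_, ?_, ?_, ?_, ?_, ?_, hbest'⟩
    · show st.m + 1 = _
      have hcq : List.countP mpMatched [q] = 1 := by simp [mpMatched, hq]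
      rw [List.countP_append, hcq, hm]
      push_cast
      ring
    · show st.mm = _
      have hcq : List.countP (fun p => !mpMatched p) [q] = 0 := by simp [mpMatched, hq]
      rw [List.countP_append, hcq, Nat.add_zero]
      exact hmm
    · intro c
      show c ∈ PySem.Set.add st.mset q.1 ↔ _
      rw [PySem.Set.mem_add, hmset c, List.mem_append, List.mem_singleton]
      constructor
      · rintro (hh | rfl)
        · exact Or.inl hh
        · exact Or.inr (pair_eta q q.1 q.1 rfl hq)
      · rintro (hh | hh)
        · exact Or.inl hh
        · exact Or.inr (congrArg Prod.fst hh)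
    · intro x y
      show (x, y) ∈ st.pset ↔ _
      rw [hpset x y, List.mem_append, List.mem_singleton]
      constructor
      · rintro ⟨hh, hne⟩
        exact ⟨Or.inl hh, hne⟩
      · rintro ⟨hh | hh, hne⟩
        · exact ⟨hh, hne⟩
        · exact absurd ((congrArg Prod.fst hh).trans (hq.trans (congrArg Prod.snd hh).symm)) hne
    · intro c
      show c ∈ st.sset ↔ _
      rw [hsset c]
      constructor
      · rintro ⟨e, hpe, hne⟩
        exact ⟨e, List.mem_append_left _ hpe, hne⟩
      · rintro ⟨e, hpe, hne⟩
        rcases List.mem_append.mp hpe with hh | hh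
        · exact ⟨e, hh, hne⟩
        · rw [List.mem_singleton] at hh
          exact absurd ((congrArg Prod.fst hh).trans (hq.trans (congrArg Prod.snd hh).symm)) hne
    · intro c
      show c ∈ st.tset ↔ _
      rw [htset c]
      constructor
      · rintro ⟨a, hpa, hne⟩
        exact ⟨a, List.mem_append_left _ hpa, hne⟩
      · rintro ⟨a, hpa, hne⟩
        rcases List.mem_append.mp hpa with hh | hh
        · exact ⟨a, hh, hne⟩
        · rw [List.mem_singleton] at hh
          exact absurd ((congrArg Prod.fst hh).trans (hq.trans (congrArg Prod.snd hh).symm)) hne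
  · rw [if_neg hq]
    refine ⟨?_, ?_, ?_, ?_, ?_, ?_, hbest'⟩
    · show st.m = _
      have hcq : List.countP mpMatched [q] = 0 := by simp [mpMatched, hq]
      rw [List.countP_append, hcq, Nat.add_zero]
      exact hm
    · show st.mm + 1 = _
      have hcq : List.countP (fun p => !mpMatched p) [q] = 1 := by simp [mpMatched, hq]
      rw [List.countP_append, hcq, hmm]
      push_cast
      ring
    · intro c
      show c ∈ st.mset ↔ _
      rw [hmset c, List.mem_append, List.mem_singleton]
      constructor
      · exact fun hh => Or.inl hh
      · rintro (hh | hh)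
        · exact hh
        · exact absurd ((congrArg Prod.fst hh).symm.trans (congrArg Prod.snd hh)) hq
    · intro x y
      show (x, y) ∈ PySem.Set.add st.pset (q.1, q.2) ↔ _
      rw [PySem.Set.mem_add, hpset x y, List.mem_append, List.mem_singleton]
      have heq2 : ((x : Char), (y : Char)) = (q.1, q.2) ↔ (x, y) = q := by rw [Prod.mk.eta]
      rw [heq2]
      constructor
      · rintro (⟨hh, hne⟩ | hh)
        · exact ⟨Or.inl hh, hne⟩
        · refine ⟨Or.inr hh, ?_⟩
          intro hxy
          exact hq ((congrArg Prod.fst hh).symm.trans (hxy ▸ (congrArg Prod.snd hh)))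
      · rintro ⟨hh | hh, hne⟩
        · exact Or.inl ⟨hh, hne⟩
        · exact Or.inr hh
    · intro c
      show c ∈ PySem.Set.add st.sset q.1 ↔ _
      rw [PySem.Set.mem_add, hsset c]
      constructor
      · rintro (⟨e, hpe, hne⟩ | rfl)
        · exact ⟨e, List.mem_append_left _ hpe, hne⟩
        · exact ⟨q.2, List.mem_append_right _ (by rw [List.mem_singleton]), hq⟩
      · rintro ⟨e, hpe, hne⟩
        rcases List.mem_append.mp hpe with hh | hh
        · exact Or.inl ⟨e, hh, hne⟩
        · rw [List.mem_singleton] at hh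
          exact Or.inr (congrArg Prod.fst hh)
    · intro c
      show c ∈ PySem.Set.add st.tset q.2 ↔ _
      rw [PySem.Set.mem_add, htset c]
      constructor
      · rintro (⟨a, hpa, hne⟩ | rfl)
        · exact ⟨a, List.mem_append_left _ hpa, hne⟩
        · exact ⟨q.1, List.mem_append_right _ (by rw [List.mem_singleton]), hq⟩
      · rintro ⟨a, hpa, hne⟩
        rcases List.mem_append.mp hpa with hh | hh
        · exact Or.inl ⟨a, hh, hne⟩
        · rw [List.mem_singleton] at hh
          exact Or.inr (congrArg Prod.snd hh)

lemma bfold_inv (rest : List (Char × Char)) :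
    ∀ (P : List (Char × Char)) (st : BSt), BInv P st → BInv (P ++ rest) (rest.foldl bstep st) := by
  induction rest with
  | nil => intro P st h; simpa using h
  | cons q rest ih =>
    intro P st h
    have h3 := ih (P ++ [q]) (bstep st q) (bstep_inv P st q h)
    simpa [List.append_assoc] using h3

lemma B_char (s t : String) :
    matching_pairs_alt s t
      = ((s.toList.zip t.toList).countP mpMatched : Int)
        + (mchanges (s.toList.zip t.toList)).foldl max (-3) := by
  have hinit : BInv [] ⟨0, 0, PySem.Set.empty, PySem.Set.empty, PySem.Set.empty, PySem.Set.empty, -3⟩ := by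
    refine ⟨rfl, rfl, ?_, ?_, ?_, ?_, rfl⟩
    · intro c; simp [PySem.Set.empty]
    · intro x y; simp [PySem.Set.empty]
    · intro c; simp [PySem.Set.empty]
    · intro c; simp [PySem.Set.empty]
  have h := bfold_inv (s.toList.zip t.toList) [] _ hinit
  simp only [List.nil_append] at h
  obtain ⟨hm, -, -, -, -, -, hbest⟩ := h
  unfold matching_pairs_alt bfinish
  rw [hbest, hm]

-- ===== VERDICT (by name: the statement is the Claim_ definition above) =====
theorem matching_pairs_spec : Claim_equal_matching_pairs := by
  intro s t _ hpre
  show matching_pairs s t = matching_pairs_alt s t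
  rw [A_char s t hpre, B_char, pairFold_eq]
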